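-- pv_equiv track=rewrite | github.com/samarpro/villani-code | villani_code/live_display.py | apply_live_display_delta
-- ===== SOURCE A (Python) =====
-- def apply_live_display_delta(buffer: str, delta: str, started: bool) -> tuple[str, bool]:
--     """Update the live-only assistant stream buffer without altering stored transcripts.
--
--     Rules:
--     - Ignore whitespace-only deltas until first non-whitespace content arrives.
--     - Cap consecutive newlines at 2.
--     """
--     if not started and delta.strip() == "":
--         return buffer, started
--
--     started = started or bool(delta.strip())
--     if not delta:
--         return buffer, started
--
--     updated = buffer
--     for ch in delta:
--         if ch != "\n":
--             updated += ch
--             continue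
--         trailing_newlines = len(updated) - len(updated.rstrip("\n"))
--         if trailing_newlines < 2:
--             updated += "\n"
--     return updated, started
-- ===== SOURCE B (Python) =====
-- def _collapse_newline_runs(s: str) -> str:
--     """Cap every run of consecutive newlines in s at 2 (run-length scan)."""
--     out = []
--     i = 0
--     n = len(s)
--     while i < n:
--         j = i
--         if s[i] == "\n":
--             while j < n and s[j] == "\n":
--                 j += 1
--             out.append("\n" * min(j - i, 2))
--         else:
--             while j < n and s[j] != "\n":
--                 j += 1
--             out.append(s[i:j])
--         i = j
--     return "".join(out)
--
--
-- def apply_live_display_delta(buffer: str, delta: str, started: bool) -> tuple[str, bool]: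
--     if not started and delta.strip() == "":
--         return buffer, started
--
--     started = started or bool(delta.strip())
--     if not delta:
--         return buffer, started
--
--     # Stage 1: collapse newline runs inside delta; stage 2: fix the seam with
--     # the buffer's trailing newlines by arithmetic, no character-by-character pass.
--     collapsed = _collapse_newline_runs(delta)
--     k = len(buffer) - len(buffer.rstrip("\n"))
--     allowed = 2 - min(k, 2)
--     lead = len(collapsed) - len(collapsed.lstrip("\n"))
--     keep = min(lead, allowed)
--     return buffer + "\n" * keep + collapsed[lead:], started
-- ===== Notes on version B (the rewrite author's own statement) =====
-- stated objective: alternative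
-- what changed: A walks delta character by character, re-deriving the trailing-newline count by rstrip-ing the whole accumulated string at every newline; B works in stages: it run-length-collapses newline runs inside delta to at most 2, then fixes the seam with the buffer's trailing newlines by arithmetic (allowed = 2 - min(k,2), keep = min(lead, allowed)) and concatenates once.
import Mathlib
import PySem

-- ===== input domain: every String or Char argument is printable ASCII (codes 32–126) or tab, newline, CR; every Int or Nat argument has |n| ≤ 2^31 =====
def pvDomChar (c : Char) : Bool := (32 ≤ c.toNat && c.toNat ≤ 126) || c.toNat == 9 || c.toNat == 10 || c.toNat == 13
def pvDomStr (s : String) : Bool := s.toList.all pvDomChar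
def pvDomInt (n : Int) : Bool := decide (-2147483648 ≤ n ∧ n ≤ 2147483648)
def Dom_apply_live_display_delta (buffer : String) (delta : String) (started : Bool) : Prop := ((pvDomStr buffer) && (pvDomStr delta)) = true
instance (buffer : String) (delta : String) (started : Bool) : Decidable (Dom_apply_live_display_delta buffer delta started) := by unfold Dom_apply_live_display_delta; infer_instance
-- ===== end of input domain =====

-- B replaces A's per-character accumulation loop (with its rstrip re-scan) by two stages:
-- a run-length collapse of newline runs inside delta, then seam arithmetic at the buffer
-- boundary and a single concatenation (objective: alternative).

-- ===== PORT A =====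
-- len(u) - len(u.rstrip("\n")) : rstrip("\n") removes exactly the trailing '\n'
-- characters, so the difference is the number of trailing newlines (exact).
def pvTrailNl (cs : List Char) : Nat := (cs.reverse.takeWhile (fun c => c == '\n')).length

-- the body of A's `for ch in delta` loop
def pvStepA (upd : List Char) (ch : Char) : List Char :=
  if ch ≠ '\n' then upd ++ [ch]
  else if pvTrailNl upd < 2 then upd ++ ['\n'] else upd

def apply_live_display_delta (buffer : String) (delta : String) (started : Bool) : String × Bool :=
  if started = false ∧ PySem.Chars.strip delta.toList = [] then (buffer, started)
  else
    let started := started || !((PySem.Chars.strip delta.toList).isEmpty)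
    if delta.toList = [] then (buffer, started)
    else (String.mk (delta.toList.foldl pvStepA buffer.toList), started)

-- ===== PORT B =====
-- B's helper _collapse_newline_runs: scan run by run ("while j < n and …" = takeWhile /
-- dropWhile over the remaining suffix), capping each newline run at 2.
def pvCollapse (s : List Char) : List Char :=
  match s with
  | [] => []
  | c :: cs =>
    if c = '\n' then
      List.replicate (min ((c :: cs).takeWhile (fun x => x == '\n')).length 2) '\n'
        ++ pvCollapse ((c :: cs).dropWhile (fun x => x == '\n'))
    else
      (c :: cs).takeWhile (fun x => x != '\n')
        ++ pvCollapse ((c :: cs).dropWhile (fun x => x != '\n'))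
termination_by s.length
decreasing_by
  · simp only [List.dropWhile_cons, show (c == '\n') = true by simp [*], if_pos]
    exact Nat.lt_succ_of_le (List.length_dropWhile_le _ _)
  · simp only [List.dropWhile_cons, show (c != '\n') = true by simp [*], if_pos]
    exact Nat.lt_succ_of_le (List.length_dropWhile_le _ _)

def apply_live_display_delta_alt (buffer : String) (delta : String) (started : Bool) : String × Bool :=
  if started = false ∧ PySem.Chars.strip delta.toList = [] then (buffer, started)
  else
    let started := started || !((PySem.Chars.strip delta.toList).isEmpty)
    if delta.toList = [] then (buffer, started)
    else
      let collapsed := pvCollapse delta.toList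
      -- k = len(buffer) - len(buffer.rstrip("\n")) : rstrip("\n") drops the trailing '\n' run (exact)
      let k := buffer.toList.length - ((buffer.toList.reverse.dropWhile (fun c => c == '\n')).reverse).length
      let allowed := 2 - min k 2
      -- lead = len(collapsed) - len(collapsed.lstrip("\n")) : lstrip("\n") drops the leading '\n' run (exact)
      let lead := collapsed.length - (collapsed.dropWhile (fun c => c == '\n')).length
      let keep := min lead allowed
      (String.mk (buffer.toList ++ List.replicate keep '\n' ++ collapsed.drop lead), started)

-- ===== PRECONDITION & SPEC =====
def Spec_apply_live_display_delta (buffer : String) (delta : String) (started : Bool) (out : String × Bool) : Prop := out = apply_live_display_delta_alt buffer delta started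
instance (buffer : String) (delta : String) (started : Bool) (out : String × Bool) : Decidable (Spec_apply_live_display_delta buffer delta started out) := by unfold Spec_apply_live_display_delta; infer_instance

-- ===== CLAIM (what is proved, stated in full; the proofs are below) =====
def Claim_equal_apply_live_display_delta : Prop := ∀ (buffer : String) (delta : String) (started : Bool), Dom_apply_live_display_delta buffer delta started → Spec_apply_live_display_delta buffer delta started (apply_live_display_delta buffer delta started)

-- ===== LEMMAS AND PROOFS =====
-- abstract form of A's loop: the emitted suffix, driven by the trailing-run counter
def pvSeam (k : Nat) : List Char → List Char
  | [] => []
  | c :: cs =>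
    if c = '\n' then
      if k < 2 then '\n' :: pvSeam (k + 1) cs else pvSeam k cs
    else c :: pvSeam 0 cs

theorem pvTrailNl_append (u : List Char) (c : Char) :
    pvTrailNl (u ++ [c]) = if c = '\n' then pvTrailNl u + 1 else 0 := by
  unfold pvTrailNl
  by_cases h : c = '\n' <;> simp [h, List.takeWhile_cons]

theorem foldl_eq_seam (l : List Char) : ∀ u : List Char,
    l.foldl pvStepA u = u ++ pvSeam (pvTrailNl u) l := by
  induction l with
  | nil => intro u; simp [pvSeam]
  | cons c l ih =>
    intro u
    rw [List.foldl_cons]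
    by_cases hc : c = '\n'
    · subst hc
      by_cases hr : pvTrailNl u < 2
      · have : pvStepA u '\n' = u ++ ['\n'] := by simp [pvStepA, hr]
        rw [this, ih, pvTrailNl_append]
        simp [pvSeam, hr]
      · have : pvStepA u '\n' = u := by simp [pvStepA, hr]
        rw [this, ih]
        simp [pvSeam, hr]
    · have : pvStepA u c = u ++ [c] := by simp [pvStepA, hc]
      rw [this, ih, pvTrailNl_append, if_neg hc]
      simp [pvSeam, hc]

theorem pvSeam_min (l : List Char) : ∀ k, pvSeam k l = pvSeam (min k 2) l := by
  induction l with
  | nil => intro k; simp [pvSeam]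
  | cons c cs ih =>
    intro k
    by_cases hc : c = '\n'
    · subst hc
      by_cases hk : k < 2
      · have : min k 2 = k := by omega
        rw [this]
      · have h2 : min k 2 = 2 := by omega
        rw [h2, show pvSeam k ('\n' :: cs) = pvSeam k cs by simp [pvSeam, hk],
            show pvSeam 2 ('\n' :: cs) = pvSeam 2 cs by simp [pvSeam]]
        rw [ih k, h2]
    · simp [pvSeam, hc]

-- peel the leading newline run of l out of pvSeam
theorem pvSeam_peel (l : List Char) : ∀ k, k ≤ 2 →
    pvSeam k l = List.replicate (min (l.takeWhile (fun c => c == '\n')).length (2 - k)) '\n'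
      ++ pvSeam 0 (l.dropWhile (fun c => c == '\n')) := by
  induction l with
  | nil => intro k _; simp [pvSeam]
  | cons c cs ih =>
    intro k hk
    by_cases hc : c = '\n'
    · subst hc
      simp only [List.takeWhile_cons, List.dropWhile_cons, beq_self_eq_true, if_pos,
        List.length_cons]
      by_cases hr : k < 2
      · rw [show pvSeam k ('\n' :: cs) = '\n' :: pvSeam (k + 1) cs by simp [pvSeam, hr]]
        rw [ih (k + 1) (by omega)]
        have : min ((cs.takeWhile (fun c => c == '\n')).length + 1) (2 - k)
            = min (cs.takeWhile (fun c => c == '\n')).length (2 - (k + 1)) + 1 := by omega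
        rw [this, List.replicate_succ]
        simp
      · have hk2 : k = 2 := by omega
        subst hk2
        rw [show pvSeam 2 ('\n' :: cs) = pvSeam 2 cs by simp [pvSeam]]
        rw [ih 2 le_rfl]
        simp
    · simp [pvSeam, List.takeWhile_cons, List.dropWhile_cons, hc]

-- a newline-free segment passes through pvSeam 0 unchanged, resetting the counter
theorem pvSeam_seg (seg : List Char) (rest : List Char)
    (h : ∀ c ∈ seg, c ≠ '\n') : pvSeam 0 (seg ++ rest) = seg ++ pvSeam 0 rest := by
  induction seg with
  | nil => simp
  | cons c cs ih =>
    have hc : c ≠ '\n' := h c (by simp)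
    simp only [List.cons_append, pvSeam, if_neg hc]
    rw [ih (fun x hx => h x (by simp [hx]))]

theorem pvSeam_zero_eq_collapse (l : List Char) : pvSeam 0 l = pvCollapse l := by
  induction hn : l.length using Nat.strong_induction_on generalizing l with
  | _ n ih =>
  match l with
  | [] => simp [pvSeam, pvCollapse]
  | c :: cs =>
    by_cases hc : c = '\n'
    · subst hc
      rw [pvSeam_peel _ 0 (by omega)]
      rw [pvCollapse]
      simp only [if_pos rfl, Nat.sub_zero]
      congr 1
      have hlt : ((('\n' :: cs).dropWhile (fun x => x == '\n'))).length < n := by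
        subst hn
        simp only [List.dropWhile_cons, beq_self_eq_true, if_pos]
        exact Nat.lt_succ_of_le (List.length_dropWhile_le _ _)
      exact ih _ hlt _ rfl
    · have hseg : ∀ x ∈ (c :: cs).takeWhile (fun x => x != '\n'), x ≠ '\n' := by
        intro x hx
        have := List.mem_takeWhile_imp hx
        simpa using this
      have hsplit : (c :: cs) = (c :: cs).takeWhile (fun x => x != '\n')
          ++ (c :: cs).dropWhile (fun x => x != '\n') := by
        simp [List.takeWhile_append_dropWhile]
      rw [pvCollapse, if_neg hc]
      conv_lhs => rw [hsplit]
      rw [pvSeam_seg _ _ hseg]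
      congr 1
      have hlt : (((c :: cs).dropWhile (fun x => x != '\n'))).length < n := by
        subst hn
        simp only [List.dropWhile_cons, show (c != '\n') = true by simp [hc], if_pos]
        exact Nat.lt_succ_of_le (List.length_dropWhile_le _ _)
      exact ih _ hlt _ rfl

-- structure of pvCollapse: leading capped newline run, then a tail with no leading newline
theorem pvCollapse_structure (l : List Char) :
    pvCollapse l = List.replicate (min (l.takeWhile (fun c => c == '\n')).length 2) '\n'
      ++ pvCollapse (l.dropWhile (fun c => c == '\n')) := by
  match l with
  | [] => simp [pvCollapse]
  | c :: cs =>
    by_cases hc : c = '\n'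
    · subst hc; rw [pvCollapse]; simp
    · simp [List.takeWhile_cons, List.dropWhile_cons, hc]

theorem pvCollapse_no_lead (l : List Char) (h : l.takeWhile (fun c => c == '\n') = []) :
    (pvCollapse l).takeWhile (fun c => c == '\n') = [] := by
  match l with
  | [] => simp [pvCollapse]
  | c :: cs =>
    have hc : ¬ c = '\n' := by
      intro hc; subst hc; simp [List.takeWhile_cons] at h
    rw [pvCollapse, if_neg hc]
    simp [List.takeWhile_cons, List.takeWhile_append, hc]

theorem trailNl_eq_rstrip (u : List Char) :
    u.length - ((u.reverse.dropWhile (fun c => c == '\n')).reverse).length = pvTrailNl u := by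
  unfold pvTrailNl
  have := List.takeWhile_append_dropWhile (p := fun c : Char => c == '\n') (l := u.reverse)
  have hlen : (u.reverse.takeWhile (fun c => c == '\n')).length
      + (u.reverse.dropWhile (fun c => c == '\n')).length = u.length := by
    rw [← List.length_append, this, List.length_reverse]
  simp only [List.length_reverse]
  omega

-- ===== VERDICT (by name: the statement is the Claim_ definition above) =====
theorem apply_live_display_delta_spec : Claim_equal_apply_live_display_delta := by
  intro buffer delta started _
  unfold Spec_apply_live_display_delta apply_live_display_delta apply_live_display_delta_alt
  split_ifs with h1 h2
  · rfl
  · rfl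
  · simp only [Prod.mk.injEq, and_true]
    congr 1
    -- A side
    rw [foldl_eq_seam, pvSeam_min, pvSeam_peel _ _ (by omega),
        pvSeam_zero_eq_collapse]
    -- B side: name the pieces
    rw [trailNl_eq_rstrip]
    set u := buffer.toList
    set d := delta.toList
    set T := pvCollapse (d.dropWhile (fun c => c == '\n')) with hT
    set L := min (d.takeWhile (fun c => c == '\n')).length 2 with hL
    have hstruct : pvCollapse d = List.replicate L '\n' ++ T := pvCollapse_structure d
    have hTlead : T.takeWhile (fun c => c == '\n') = [] := by
      apply pvCollapse_no_lead
      match hcase : d.dropWhile (fun c => c == '\n') with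
      | [] => simp
      | c :: cs =>
        have hc : (c == '\n') = false := by
          have := List.head?_dropWhile_not (p := fun c : Char => c == '\n') d
          rw [hcase] at this; simpa using this
        simp [List.takeWhile_cons, hc]
    have hTd : List.dropWhile (fun c => c == '\n') T = T := by
      rw [List.dropWhile_eq_self_iff]
      rw [List.takeWhile_eq_nil_iff] at hTlead
      exact hTlead
    have hdropAll : (pvCollapse d).dropWhile (fun c => c == '\n') = T := by
      rw [hstruct, List.dropWhile_append]
      simp [List.dropWhile_replicate, hTd]
    have hlead : (pvCollapse d).length - ((pvCollapse d).dropWhile (fun c => c == '\n')).length = L := by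
      rw [hdropAll, hstruct]
      simp
    rw [hlead, hstruct]
    have hdropL : (List.replicate L '\n' ++ T).drop L = T := by
      simpa using List.drop_left (List.replicate L '\n') T
    rw [hdropL]
    have hkeep : min L (2 - min (pvTrailNl u) 2)
        = min (d.takeWhile (fun c => c == '\n')).length (2 - min (pvTrailNl u) 2) := by
      rw [hL]; omega
    rw [hkeep]
    simp
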